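-- pv_equiv track=rewrite | github.com/duailibe/advent-of-code-2021 | day02/main.py | pilot_with_aim
-- ===== SOURCE A (Python) =====
-- def pilot_with_aim(instructions):
--     pos = 0
--     depth = 0
--     aim = 0
--     for cmd, amount in instructions:
--         if cmd == "forward":
--             pos += amount
--             depth += aim * amount
--         elif cmd == "up":
--             aim -= amount
--         elif cmd == "down":
--             aim += amount
--
--     return (pos, depth)
-- ===== SOURCE B (Python) =====
-- def pilot_with_aim(instructions):
--     instrs = list(instructions)
--     # prefix table: aims[i] is the aim in effect when instruction i runs
--     aims = [0]
--     a = 0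
--     for cmd, amount in instrs:
--         a += amount if cmd == "down" else -amount if cmd == "up" else 0
--         aims.append(a)
--     pos = sum(amount for cmd, amount in instrs if cmd == "forward")
--     depth = sum(amount * aim for (cmd, amount), aim in zip(instrs, aims)
--                 if cmd == "forward")
--     return (pos, depth)
-- ===== Notes on version B (the rewrite author's own statement) =====
-- stated objective: alternative
-- what changed: Replaces A's single stateful simulation loop by a two-pass table approach: first build a prefix table of aim values, then compute pos and depth as sums over the forward instructions zipped with that table.
import Mathlib
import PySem

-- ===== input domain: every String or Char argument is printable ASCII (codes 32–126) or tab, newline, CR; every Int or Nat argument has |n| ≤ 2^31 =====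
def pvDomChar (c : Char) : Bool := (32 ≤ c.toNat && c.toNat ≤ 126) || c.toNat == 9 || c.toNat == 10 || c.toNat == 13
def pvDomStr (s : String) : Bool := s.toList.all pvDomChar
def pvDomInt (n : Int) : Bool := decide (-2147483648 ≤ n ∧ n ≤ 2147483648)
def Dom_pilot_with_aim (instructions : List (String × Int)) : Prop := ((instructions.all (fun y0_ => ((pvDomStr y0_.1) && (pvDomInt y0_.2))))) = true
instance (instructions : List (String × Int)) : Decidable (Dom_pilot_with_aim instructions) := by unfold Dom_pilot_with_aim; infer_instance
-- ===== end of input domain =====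

-- B: two-pass prefix-table formulation instead of A's single stateful simulation loop (alternative decomposition, same cost).
-- ===== PORT A =====
def pilot_with_aim (instructions : List (String × Int)) : Int × Int :=
  let st := instructions.foldl (fun (s : Int × Int × Int) p =>
    if p.1 == "forward" then (s.1 + p.2, s.2.1 + s.2.2 * p.2, s.2.2)
    else if p.1 == "up" then (s.1, s.2.1, s.2.2 - p.2)
    else if p.1 == "down" then (s.1, s.2.1, s.2.2 + p.2)
    else s) (0, 0, 0)
  (st.1, st.2.1)

-- ===== PORT B =====
-- the aim-delta of one instruction
def pwaDelta (p : String × Int) : Int :=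
  if p.1 == "down" then p.2 else if p.1 == "up" then -p.2 else 0

def pilot_with_aim_alt (instructions : List (String × Int)) : Int × Int :=
  let st := instructions.foldl (fun (s : List Int × Int) p =>
      let a := s.2 + pwaDelta p
      (s.1 ++ [a], a)) ([0], 0)
  let aims := st.1
  let pos := instructions.foldl
      (fun s p => if p.1 == "forward" then s + p.2 else s) 0
  let depth := (instructions.zip aims).foldl
      (fun s pa => if pa.1.1 == "forward" then s + pa.1.2 * pa.2 else s) 0
  (pos, depth)

-- ===== PRECONDITION & SPEC =====
def Spec_pilot_with_aim (instructions : List (String × Int)) (out : Int × Int) : Prop := out = pilot_with_aim_alt instructions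
instance (instructions : List (String × Int)) (out : Int × Int) : Decidable (Spec_pilot_with_aim instructions out) := by unfold Spec_pilot_with_aim; infer_instance

-- ===== CLAIM (what is proved, stated in full; the proofs are below) =====
def Claim_equal_pilot_with_aim : Prop := ∀ (instructions : List (String × Int)), Dom_pilot_with_aim instructions → Spec_pilot_with_aim instructions (pilot_with_aim instructions)

-- ===== LEMMAS AND PROOFS =====

def pwaPos : List (String × Int) → Int
  | [] => 0
  | p :: t => (if p.1 == "forward" then p.2 else 0) + pwaPos t

def pwaDepth : Int → List (String × Int) → Int
  | _, [] => 0
  | a, p :: t => (if p.1 == "forward" then p.2 * a else 0) + pwaDepth (a + pwaDelta p) t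

def pwaSum : List (String × Int) → Int
  | [] => 0
  | p :: t => pwaDelta p + pwaSum t

-- the tail of the prefix-aim table starting from aim a
def pwaTails : Int → List (String × Int) → List Int
  | _, [] => []
  | a, p :: t => (a + pwaDelta p) :: pwaTails (a + pwaDelta p) t

theorem pwaA_fold (l : List (String × Int)) : ∀ (p d a : Int),
    l.foldl (fun (s : Int × Int × Int) q =>
      if q.1 == "forward" then (s.1 + q.2, s.2.1 + s.2.2 * q.2, s.2.2)
      else if q.1 == "up" then (s.1, s.2.1, s.2.2 - q.2)
      else if q.1 == "down" then (s.1, s.2.1, s.2.2 + q.2)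
      else s) (p, d, a)
    = (p + pwaPos l, d + pwaDepth a l, a + pwaSum l) := by
  induction l with
  | nil => intro p d a; simp [pwaPos, pwaDepth, pwaSum]
  | cons q t ih =>
    intro p d a
    simp only [List.foldl_cons, pwaPos, pwaDepth, pwaSum, pwaDelta]
    split_ifs <;> simp_all [Prod.mk.injEq] <;> ring_nf <;> simp

theorem pwaB_pos (l : List (String × Int)) : ∀ (s : Int),
    l.foldl (fun s p => if p.1 == "forward" then s + p.2 else s) s = s + pwaPos l := by
  induction l with
  | nil => intro s; simp [pwaPos]
  | cons q t ih =>
    intro s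
    simp only [List.foldl_cons, pwaPos, ih]
    split_ifs <;> ring

theorem pwaB_aims (l : List (String × Int)) : ∀ (acc : List Int) (a : Int),
    l.foldl (fun (s : List Int × Int) p =>
      (s.1 ++ [s.2 + pwaDelta p], s.2 + pwaDelta p)) (acc, a)
    = (acc ++ pwaTails a l, a + pwaSum l) := by
  induction l with
  | nil => intro acc a; simp [pwaTails, pwaSum]
  | cons q t ih =>
    intro acc a
    simp only [List.foldl_cons, pwaTails, pwaSum, ih]
    simp [add_assoc]

theorem pwaB_depth (l : List (String × Int)) : ∀ (a s : Int),
    (l.zip (a :: pwaTails a l)).foldl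
      (fun s pa => if pa.1.1 == "forward" then s + pa.1.2 * pa.2 else s) s
    = s + pwaDepth a l := by
  induction l with
  | nil => intro a s; simp [pwaDepth]
  | cons q t ih =>
    intro a s
    simp only [pwaTails, List.zip_cons_cons, List.foldl_cons, pwaDepth, ih]
    split_ifs <;> ring

-- ===== VERDICT (by name: the statement is the Claim_ definition above) =====
theorem pilot_with_aim_spec : Claim_equal_pilot_with_aim := by
  intro l _
  unfold Spec_pilot_with_aim pilot_with_aim pilot_with_aim_alt
  simp only []
  rw [pwaA_fold, pwaB_aims, pwaB_pos]
  have hd := pwaB_depth l 0 0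
  simp only [List.cons_append, List.nil_append] at *
  rw [hd]
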